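-- pv_equiv track=rewrite | github.com/2e0byo/vfd-clock | main.py | transform
-- ===== SOURCE A (Python) =====
-- def transform(old: int):
--     new = 0
--     mapping = (6, 5, 4, 3, 2, 1, 0, 7)
--     for i in range(8):
--         if old & 1:
--             new |= 1 << mapping[i]
--         old >>= 1
--     return new
-- ===== SOURCE B (Python) =====
-- def transform(old: int):
--     low = old & 0x7F
--     top = old & 0x80
--     return int('{:07b}'.format(low)[::-1], 2) | top
-- ===== Notes on version B (the rewrite author's own statement) =====
-- stated objective: idiomatic
-- what changed: Replaced the eight-iteration shift/test/OR loop over a permutation table by a closed form: mask the low seven bits, reverse them via a seven-character binary-string reversal, and OR the masked top bit back in.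
import Mathlib
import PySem

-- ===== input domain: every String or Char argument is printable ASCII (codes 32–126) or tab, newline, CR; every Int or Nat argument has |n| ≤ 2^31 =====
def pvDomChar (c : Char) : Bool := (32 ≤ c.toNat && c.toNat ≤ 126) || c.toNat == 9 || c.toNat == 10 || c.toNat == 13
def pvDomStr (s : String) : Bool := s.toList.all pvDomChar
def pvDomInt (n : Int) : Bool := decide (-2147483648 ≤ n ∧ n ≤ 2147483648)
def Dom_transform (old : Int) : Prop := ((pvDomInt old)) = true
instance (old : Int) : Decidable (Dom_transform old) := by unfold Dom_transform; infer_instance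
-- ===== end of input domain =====

-- B replaces A's per-bit shift/test/OR loop by a closed form: mask the low seven bits,
-- reverse them via a seven-character binary-string reversal, and OR the top bit back in (objective: idiomatic).

-- ===== PORT A =====
-- the tuple 'mapping = (6, 5, 4, 3, 2, 1, 0, 7)'
def pvMapping : List Nat := [6, 5, 4, 3, 2, 1, 0, 7]

-- 'for i in range(8): if old & 1: new |= 1 << mapping[i]; old >>= 1' over state (new, old)
def transform (old : Int) : Int :=
  let r := (PySem.List.pyRange 0 8 1).foldl
    (fun (s : Int × Int) i =>
      let new := if PySem.Int.band s.2 1 ≠ 0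
                 then PySem.Int.bor s.1 ((1 : Int) <<< (pvMapping.getD i.toNat 0))
                 else s.1
      (new, s.2 >>> (1 : Nat))) ((0 : Int), old)
  r.1

-- ===== PORT B =====
-- "'{:07b}'.format(n)" for 0 ≤ n < 128: hand port, exact on that range (7 binary digits, MSB first)
def pvBin7 (n : Int) : List Char :=
  (List.range 7).map (fun k => if PySem.Int.mod (n >>> (6 - k)) 2 = 1 then '1' else '0')

-- "int(s, 2)" for a string of '0'/'1' characters: hand port, exact on that domain
def pvParseBin (s : List Char) : Int :=
  s.foldl (fun acc c => 2 * acc + (if c = '1' then 1 else 0)) 0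

def transform_alt (old : Int) : Int :=
  let low := PySem.Int.band old 127
  let top := PySem.Int.band old 128
  PySem.Int.bor (pvParseBin (pvBin7 low).reverse) top

-- ===== PRECONDITION & SPEC =====
def Spec_transform (old : Int) (out : Int) : Prop := out = transform_alt old
instance (old : Int) (out : Int) : Decidable (Spec_transform old out) := by unfold Spec_transform; infer_instance

-- ===== CLAIM (what is proved, stated in full; the proofs are below) =====
def Claim_equal_transform : Prop := ∀ (old : Int), Dom_transform old → Spec_transform old (transform old)

-- ===== LEMMAS AND PROOFS =====

-- a & 127 = a % 128 (Python semantics, every sign)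
theorem pv_band_127 (a : Int) : PySem.Int.band a 127 = a % 128 := by
  unfold PySem.Int.band
  simp only [show ((0:Int) ≤ 127) = True from by norm_num, if_true,
             show (127 : Int).toNat = 127 from rfl]
  split_ifs with h1
  · have hn := Nat.and_two_pow_sub_one_eq_mod a.toNat 7
    norm_num at hn
    omega
  · set t := (-a - 1).toNat with ht
    have hn : 127 &&& t = t % 128 := by
      rw [Nat.and_comm]
      simpa using Nat.and_two_pow_sub_one_eq_mod t 7
    omega

-- a & 128 = a % 256 - a % 128 (the eighth bit, Python semantics, every sign)
theorem pv_band_128 (a : Int) : PySem.Int.band a 128 = a % 256 - a % 128 := by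
  have key : ∀ n : Nat, n &&& 128 = n / 128 % 2 * 128 := by
    intro n
    have h := Nat.and_two_pow n 7
    have ht := Nat.toNat_testBit n 7
    norm_num at h ht
    omega
  unfold PySem.Int.band
  simp only [show ((0:Int) ≤ 128) = True from by norm_num, if_true,
             show (128 : Int).toNat = 128 from rfl]
  split_ifs with h1
  · have := key a.toNat
    omega
  · have := key (-a - 1).toNat
    rw [Nat.and_comm] at this
    omega

-- low bits of successive halvings depend only on a % 256
theorem pv_bit_mod (a : Int) (k : Nat) (hk : k < 8) :
    PySem.Int.band (a / 2 ^ k) 1 = PySem.Int.band (a % 256 / 2 ^ k) 1 := by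
  rw [PySem.Int.band_one, PySem.Int.band_one, PySem.Int.mod_eq_emod_of_pos (by norm_num),
      PySem.Int.mod_eq_emod_of_pos (by norm_num)]
  interval_cases k <;> norm_num <;> omega

-- A's value depends on old only through old % 256
theorem pv_transform_mod (a : Int) : transform a = transform (a % 256) := by
  have hs : ∀ b : Int, b >>> (1 : Nat) = b / 2 := by
    intro b; simpa using Int.shiftRight_eq_div_pow b 1
  have hrange : PySem.List.pyRange 0 8 1 = [0, 1, 2, 3, 4, 5, 6, 7] := by decide
  have flat : ∀ b : Int, b / 2 / 2 = b / 4 ∧ b / 4 / 2 = b / 8 ∧ b / 8 / 2 = b / 16 ∧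
      b / 16 / 2 = b / 32 ∧ b / 32 / 2 = b / 64 ∧ b / 64 / 2 = b / 128 := by
    intro b; refine ⟨by omega, by omega, by omega, by omega, by omega, by omega⟩
  obtain ⟨fa1, fa2, fa3, fa4, fa5, fa6⟩ := flat a
  obtain ⟨fm1, fm2, fm3, fm4, fm5, fm6⟩ := flat (a % 256)
  have h0 := pv_bit_mod a 0 (by norm_num)
  have h1 := pv_bit_mod a 1 (by norm_num)
  have h2 := pv_bit_mod a 2 (by norm_num)
  have h3 := pv_bit_mod a 3 (by norm_num)
  have h4 := pv_bit_mod a 4 (by norm_num)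
  have h5 := pv_bit_mod a 5 (by norm_num)
  have h6 := pv_bit_mod a 6 (by norm_num)
  have h7 := pv_bit_mod a 7 (by norm_num)
  norm_num at h0 h1 h2 h3 h4 h5 h6 h7
  simp only [transform, hrange, List.foldl, hs, fa1, fa2, fa3, fa4, fa5, fa6,
             fm1, fm2, fm3, fm4, fm5, fm6]
  rw [h0, h1, h2, h3, h4, h5, h6, h7]

-- B's value depends on old only through old % 256
theorem pv_transform_alt_mod (a : Int) : transform_alt a = transform_alt (a % 256) := by
  simp only [transform_alt, pv_band_127, pv_band_128]
  have h1 : a % 128 = a % 256 % 128 := by omega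
  have h2 : a % 256 % 256 = a % 256 := by omega
  rw [h2, ← h1]

-- the two ports agree on every residue mod 256
set_option maxRecDepth 40000 in
theorem pv_agree_byte : ∀ r : Nat, r < 256 → transform (r : Int) = transform_alt (r : Int) := by
  decide

-- ===== VERDICT (by name: the statement is the Claim_ definition above) =====
theorem transform_spec : Claim_equal_transform := by
  intro old _
  unfold Spec_transform
  rw [pv_transform_mod, pv_transform_alt_mod]
  have hge : 0 ≤ old % 256 := Int.emod_nonneg old (by norm_num)
  have hlt : old % 256 < 256 := Int.emod_lt_of_pos old (by norm_num)
  have h := pv_agree_byte (old % 256).toNat (by omega)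
  rwa [Int.toNat_of_nonneg hge] at h
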